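-- pv_equiv track=rewrite | github.com/bharathv2605-arch/Research_Gap_finder | keyword_extractor.py | get_unique_keywords
-- ===== SOURCE A (Python) =====
-- def get_unique_keywords(keywords_list):
--     """
--     Find keywords unique to each paper (not found in other papers).
--     Args:
--         keywords_list: List of keyword lists (one per paper)
--     Returns:
--         List of sets, each containing unique keywords for that paper
--     """
--     if not keywords_list:
--         return []
--
--     # Get all keyword sets
--     keyword_sets = []
--     for keywords in keywords_list:
--         kw_set = set(kw for kw, score in keywords)
--         keyword_sets.append(kw_set)
--
--     # For each paper, find keywords not in any other paper
--     unique_per_paper = []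
--     for i, kw_set in enumerate(keyword_sets):
--         other_keywords = set()
--         for j, other_set in enumerate(keyword_sets):
--             if i != j:
--                 other_keywords.update(other_set)
--         unique = kw_set - other_keywords
--         unique_per_paper.append(unique)
--
--     return unique_per_paper
-- ===== SOURCE B (Python) =====
-- def get_unique_keywords(keywords_list):
--     """
--     Find keywords unique to each paper (not found in other papers).
--
--     One pass: count, for every keyword, in how many papers it occurs
--     (once per paper via ordered dedup); a keyword is unique to its paper
--     exactly when that count is 1.
--     """
--     distinct = [list(dict.fromkeys(kw for kw, score in kws)) for kws in keywords_list]
--     counts = {}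
--     for d in distinct:
--         for kw in d:
--             counts[kw] = counts.get(kw, 0) + 1
--     return [{kw for kw in d if counts[kw] == 1} for d in distinct]
-- ===== Notes on version B (the rewrite author's own statement) =====
-- stated objective: faster
-- what changed: Instead of rebuilding the union of all other papers' keyword sets for every paper (quadratic in the number of papers), B counts in one pass how many papers contain each keyword and keeps those with count 1.
import Mathlib
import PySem

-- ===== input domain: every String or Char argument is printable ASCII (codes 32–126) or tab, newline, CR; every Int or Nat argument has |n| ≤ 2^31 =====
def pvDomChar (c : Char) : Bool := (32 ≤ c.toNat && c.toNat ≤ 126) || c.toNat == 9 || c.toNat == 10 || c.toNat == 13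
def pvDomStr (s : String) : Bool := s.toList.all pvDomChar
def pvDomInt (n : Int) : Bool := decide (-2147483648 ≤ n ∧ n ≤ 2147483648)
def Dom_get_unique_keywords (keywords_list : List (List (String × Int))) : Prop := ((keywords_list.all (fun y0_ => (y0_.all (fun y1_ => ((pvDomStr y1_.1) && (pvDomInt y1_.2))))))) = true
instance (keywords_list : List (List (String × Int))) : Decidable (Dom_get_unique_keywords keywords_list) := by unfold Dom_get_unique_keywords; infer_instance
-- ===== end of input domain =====

-- B replaces A's per-paper union of all other papers' keyword sets by a single
-- pass counting in how many papers each keyword occurs (unique ⟺ count = 1).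

-- ===== PORT A =====
def get_unique_keywords (keywords_list : List (List (String × Int))) : List (List String) :=
  if keywords_list = [] then []
  else
    -- keyword_sets: one set per paper, in order
    let keyword_sets : List (PySem.Set String) := keywords_list.foldl
      (fun acc keywords => acc ++ [PySem.Set.ofList (keywords.map (fun p => p.1))]) []
    -- for each paper i, union the other papers' sets and subtract
    let unique_per_paper : List (List String) := (PySem.List.enumerate keyword_sets).foldl
      (fun acc p =>
        let other := (PySem.List.enumerate keyword_sets).foldl
          (fun o q => if p.1 ≠ q.1 then PySem.Set.update o q.2 else o) PySem.Set.empty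
        acc ++ [PySem.Set.diff p.2 other]) []
    unique_per_paper

-- ===== PORT B =====
def get_unique_keywords_alt (keywords_list : List (List (String × Int))) : List (List String) :=
  let distinct : List (List String) := keywords_list.map
    (fun kws => PySem.List.dedup (kws.map (fun p => p.1)))
  let counts : PySem.Dict String Int := distinct.foldl
    (fun c d => d.foldl (fun c kw => c.insert kw (c.getD kw 0 + 1)) c) PySem.Dict.empty
  distinct.map (fun d => PySem.Set.ofList (d.filter (fun kw => counts.getD kw 0 == 1)))

-- ===== PRECONDITION & SPEC =====
def Spec_get_unique_keywords (keywords_list : List (List (String × Int))) (out : List (List String)) : Prop := out = get_unique_keywords_alt keywords_list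
instance (keywords_list : List (List (String × Int))) (out : List (List String)) : Decidable (Spec_get_unique_keywords keywords_list out) := by unfold Spec_get_unique_keywords; infer_instance

-- ===== CLAIM (what is proved, stated in full; the proofs are below) =====
def Claim_equal_get_unique_keywords : Prop := ∀ (keywords_list : List (List (String × Int))), Dom_get_unique_keywords keywords_list → Spec_get_unique_keywords keywords_list (get_unique_keywords keywords_list)

-- ===== LEMMAS AND PROOFS =====

-- membership in A's conditional-union loop
theorem pv_mem_foldl_update {α : Type} [BEq α] [LawfulBEq α] (i : Int)
    (l : List (Int × PySem.Set α)) (s : PySem.Set α) (x : α) :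
    x ∈ l.foldl (fun o q => if i ≠ q.1 then PySem.Set.update o q.2 else o) s ↔
      x ∈ s ∨ ∃ q ∈ l, i ≠ q.1 ∧ x ∈ q.2 := by
  induction l generalizing s with
  | nil => simp
  | cons q t ih =>
    simp only [List.foldl_cons]
    by_cases h : i ≠ q.1
    · simp only [if_pos h, ih, PySem.Set.mem_update]
      constructor
      · rintro ((hs | hq) | ⟨r, hr, hir, hxr⟩)
        · exact Or.inl hs
        · exact Or.inr ⟨q, List.mem_cons_self .., h, hq⟩
        · exact Or.inr ⟨r, List.mem_cons_of_mem _ hr, hir, hxr⟩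
      · rintro (hs | ⟨r, hr, hir, hxr⟩)
        · exact Or.inl (Or.inl hs)
        · rcases List.mem_cons.mp hr with rfl | hr
          · exact Or.inl (Or.inr hxr)
          · exact Or.inr ⟨r, hr, hir, hxr⟩
    · simp only [if_neg h, ih]
      constructor
      · rintro (hs | ⟨r, hr, hir, hxr⟩)
        · exact Or.inl hs
        · exact Or.inr ⟨r, List.mem_cons_of_mem _ hr, hir, hxr⟩
      · rintro (hs | ⟨r, hr, hir, hxr⟩)
        · exact Or.inl hs
        · rcases List.mem_cons.mp hr with rfl | hr
          · exact absurd hir h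
          · exact Or.inr ⟨r, hr, hir, hxr⟩

-- counting occurrences in a flatten of nodup lists = counting the lists that contain x
theorem pv_count_flatten_eq_countP (x : String) (l : List (List String))
    (hn : ∀ d ∈ l, d.Nodup) :
    List.count x l.flatten = l.countP (fun d => decide (x ∈ d)) := by
  induction l with
  | nil => simp
  | cons d t ih =>
    simp only [List.flatten_cons, List.count_append, List.countP_cons]
    rw [ih (fun e he => hn e (List.mem_cons_of_mem _ he))]
    by_cases hx : x ∈ d
    · rw [List.count_eq_one_of_mem (hn d (List.mem_cons_self ..)) hx]
      simp [hx, Nat.add_comm]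
    · rw [List.count_eq_zero_of_not_mem hx]
      simp [hx]

-- countP = 1 at a member ↔ no other position contains x
theorem pv_countP_one_iff (x : String) (l : List (List String)) (i : Nat)
    (hi : i < l.length) (hx : x ∈ l[i]) :
    l.countP (fun d => decide (x ∈ d)) = 1 ↔
      ∀ j, (hj : j < l.length) → j ≠ i → x ∉ l[j] := by
  have hsplit : l = l.take i ++ l[i] :: l.drop (i + 1) := by
    conv_lhs => rw [← List.take_append_drop i l, List.drop_eq_getElem_cons hi]
  constructor
  · intro h1 j hj hji hxj
    rw [hsplit, List.countP_append, List.countP_cons] at h1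
    simp only [hx, decide_true, if_pos] at h1
    rcases Nat.lt_or_ge j i with hlt | hge
    · have hjl : j < (l.take i).length := by rw [List.length_take]; omega
      have hmem : l[j] ∈ l.take i := by
        have h2 : (l.take i)[j] = l[j] := List.getElem_take
        rw [← h2]; exact List.getElem_mem hjl
      have := List.countP_eq_zero.mp (by omega : (l.take i).countP (fun d => decide (x ∈ d)) = 0) _ hmem
      simp [hxj] at this
    · have hgt : i + 1 ≤ j := by omega
      have hjl : j - (i + 1) < (l.drop (i + 1)).length := by rw [List.length_drop]; omega
      have hmem : l[j] ∈ l.drop (i + 1) := by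
        have h2 : (l.drop (i + 1))[j - (i + 1)] = l[i + 1 + (j - (i + 1))] := List.getElem_drop
        have heq : i + 1 + (j - (i + 1)) = j := by omega
        simp only [heq] at h2
        rw [← h2]; exact List.getElem_mem hjl
      have := List.countP_eq_zero.mp (by omega : (l.drop (i + 1)).countP (fun d => decide (x ∈ d)) = 0) _ hmem
      simp [hxj] at this
  · intro h
    rw [hsplit, List.countP_append, List.countP_cons]
    simp only [hx, decide_true, if_pos]
    have ht : (l.take i).countP (fun d => decide (x ∈ d)) = 0 := by
      apply List.countP_eq_zero.mpr
      intro a ha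
      rcases List.getElem_of_mem ha with ⟨k, hk, rfl⟩
      have hki : k < i := by have h' := hk; rw [List.length_take] at h'; omega
      rw [List.getElem_take]
      simpa using h k (by omega) (by omega)
    have hd : (l.drop (i + 1)).countP (fun d => decide (x ∈ d)) = 0 := by
      apply List.countP_eq_zero.mpr
      intro a ha
      rcases List.getElem_of_mem ha with ⟨k, hk, rfl⟩
      have hkl : i + 1 + k < l.length := by have h' := hk; rw [List.length_drop] at h'; omega
      rw [List.getElem_drop]
      simpa using h (i + 1 + k) hkl (by omega)
    omega

-- B's counter is the number of papers whose distinct keywords contain x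
theorem pv_counts_getD (distinct : List (List String)) (x : String) :
    (distinct.foldl (fun c d => d.foldl (fun c kw => c.insert kw (c.getD kw 0 + 1)) c)
        PySem.Dict.empty).getD x 0 = (List.count x distinct.flatten : Int) := by
  rw [← List.foldl_flatten]
  have : (fun (c : PySem.Dict String Int) kw => c.insert kw (c.getD kw 0 + 1)) =
      (fun c kw => c.modify kw 0 (· + 1)) := rfl
  rw [this, PySem.Dict.getD_foldl_modify_add_one, PySem.Dict.getD_empty]
  ring

-- ===== VERDICT (by name: the statement is the Claim_ definition above) =====
theorem get_unique_keywords_spec : Claim_equal_get_unique_keywords := by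
  intro kl _
  unfold Spec_get_unique_keywords get_unique_keywords get_unique_keywords_alt
  by_cases hnil : kl = []
  · subst hnil; simp
  · rw [if_neg hnil]
    simp only [PySem.List.dedup_eq_ofList]
    set sets : List (PySem.Set String) :=
      kl.map (fun kws => PySem.Set.ofList (kws.map (fun p => p.1))) with hsets
    have hfold1 : kl.foldl
        (fun acc keywords => acc ++ [PySem.Set.ofList (keywords.map (fun p => p.1))]) [] = sets := by
      rw [PySem.List.foldl_append_singleton_eq_map]; simp [hsets]
    rw [hfold1]
    rw [PySem.List.foldl_append_singleton_eq_map]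
    simp only [List.nil_append]
    -- nodup of each set
    have hnodup : ∀ d ∈ sets, d.Nodup := by
      intro d hd
      rcases List.mem_map.mp hd with ⟨kws, _, rfl⟩
      exact PySem.Set.nodup_ofList _
    -- elementwise
    apply List.ext_getElem
    · simp [PySem.List.length_enumerate]
    · intro i hi1 hi2
      have hilen : i < sets.length := by
        simpa [PySem.List.length_enumerate] using hi1
      rw [List.getElem_map, List.getElem_map, PySem.List.getElem_enumerate]
      simp only [zero_add]
      have hni : sets[i].Nodup := hnodup _ (List.getElem_mem hilen)
      rw [PySem.Set.ofList_eq_self_of_nodup _ (List.Nodup.filter _ hni)]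
      show PySem.Set.diff sets[i] _ = _
      unfold PySem.Set.diff
      apply List.filter_congr
      intro x hx
      -- LHS: x not in any other paper's set; RHS: count = 1
      rw [pv_counts_getD, pv_count_flatten_eq_countP x sets hnodup]
      have hmem : x ∈ (PySem.List.enumerate sets 0).foldl
          (fun o q => if (i : Int) ≠ q.1 then PySem.Set.update o q.2 else o) PySem.Set.empty ↔
          ∃ j, ∃ _ : j < sets.length, j ≠ i ∧ x ∈ sets[j] := by
        rw [pv_mem_foldl_update]
        constructor
        · rintro (hs | ⟨q, hq, hiq, hxq⟩)
          · simp [PySem.Set.empty] at hs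
          · rcases (PySem.List.mem_enumerate_iff _ _ _).mp hq with ⟨k, hk, rfl⟩
            refine ⟨k, hk, ?_, hxq⟩
            intro hki; apply hiq; simp [hki]
        · rintro ⟨j, hj, hji, hxj⟩
          refine Or.inr ⟨((0 : Int) + j, sets[j]), (PySem.List.mem_enumerate_iff _ _ _).mpr ⟨j, hj, rfl⟩, ?_, hxj⟩
          simp; omega
      have hcnt := pv_countP_one_iff x sets i hilen hx
      by_cases hother : ∃ j, ∃ _ : j < sets.length, j ≠ i ∧ x ∈ sets[j]
      · have hne : sets.countP (fun d => decide (x ∈ d)) ≠ 1 := by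
          intro h1
          rcases hother with ⟨j, hj, hji, hxj⟩
          exact hcnt.mp h1 j hj hji hxj
        have hc : ((PySem.List.enumerate sets 0).foldl
            (fun o q => if (i : Int) ≠ q.1 then PySem.Set.update o q.2 else o)
            PySem.Set.empty).contains x = true :=
          (PySem.Set.contains_iff _ _).mpr (hmem.mpr hother)
        rw [hc]
        simp [Nat.cast_eq_one, hne]
      · have h1 : sets.countP (fun d => decide (x ∈ d)) = 1 :=
          hcnt.mpr (fun j hj hji hxj => hother ⟨j, hj, hji, hxj⟩)
        have hc : ((PySem.List.enumerate sets 0).foldl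
            (fun o q => if (i : Int) ≠ q.1 then PySem.Set.update o q.2 else o)
            PySem.Set.empty).contains x = false := by
          rw [← Bool.not_eq_true, PySem.Set.contains_iff]
          exact hmem.not.mpr hother
        rw [hc]
        simp [h1]
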